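-- pv_equiv track=rewrite | github.com/l33tdaima/l33tdaima | pr1662e/array_strings_are_equal.py | arrayStringsAreEqualV2
-- ===== SOURCE A (Python) =====
-- from typing import List
--
-- def arrayStringsAreEqualV2(word1: List[str], word2: List[str]) -> bool:
--     def generator(word: List[str]):
--         for s in word:
--             for c in s:
--                 yield c
--         yield None
--
--     for c1, c2 in zip(generator(word1), generator(word2)):
--         if c1 != c2:
--             return False
--     return True
-- ===== SOURCE B (Python) =====
-- from typing import List
--
-- def arrayStringsAreEqualV2(word1: List[str], word2: List[str]) -> bool:
--     return "".join(word1) == "".join(word2)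
-- ===== Notes on version B (the rewrite author's own statement) =====
-- stated objective: idiomatic
-- what changed: Replaced the two character-streaming generators with a None sentinel zipped and compared pairwise by a direct join-and-compare: build each concatenation with "".join and return the string equality.
import Mathlib
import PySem

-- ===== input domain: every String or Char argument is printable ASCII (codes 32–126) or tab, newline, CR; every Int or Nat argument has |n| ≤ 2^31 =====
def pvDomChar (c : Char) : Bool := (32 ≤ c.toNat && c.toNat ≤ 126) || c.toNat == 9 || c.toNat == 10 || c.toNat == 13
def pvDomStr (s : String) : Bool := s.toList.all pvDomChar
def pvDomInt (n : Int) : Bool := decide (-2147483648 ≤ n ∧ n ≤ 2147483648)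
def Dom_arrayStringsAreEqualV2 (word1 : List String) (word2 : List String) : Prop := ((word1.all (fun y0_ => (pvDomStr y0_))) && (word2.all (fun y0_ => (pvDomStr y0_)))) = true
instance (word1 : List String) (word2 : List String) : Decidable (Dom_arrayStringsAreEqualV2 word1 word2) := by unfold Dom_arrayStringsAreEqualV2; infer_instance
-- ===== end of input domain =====

-- B replaces A's zipped character generators with a None sentinel by joining each
-- list into one string and comparing the strings (idiomatic; same O(n) cost).

-- ===== PORT A =====
-- generator(word): yields every character of every string, then a final None.
def pvGen (word : List String) : List (Option Char) :=
  (word.flatMap (fun s => s.toList.map some)) ++ [none]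

-- the for-loop over zip(...) with early return False
def pvCheck : List (Option Char × Option Char) → Bool
  | [] => true
  | (c1, c2) :: rest => if c1 != c2 then false else pvCheck rest

def arrayStringsAreEqualV2 (word1 : List String) (word2 : List String) : Bool :=
  pvCheck ((pvGen word1).zip (pvGen word2))

-- ===== PORT B =====
def arrayStringsAreEqualV2_alt (word1 : List String) (word2 : List String) : Bool :=
  PySem.Str.join "" word1 == PySem.Str.join "" word2

-- ===== PRECONDITION & SPEC =====
def Spec_arrayStringsAreEqualV2 (word1 : List String) (word2 : List String) (out : Bool) : Prop := out = arrayStringsAreEqualV2_alt word1 word2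
instance (word1 : List String) (word2 : List String) (out : Bool) : Decidable (Spec_arrayStringsAreEqualV2 word1 word2 out) := by unfold Spec_arrayStringsAreEqualV2; infer_instance

-- ===== CLAIM (what is proved, stated in full; the proofs are below) =====
def Claim_equal_arrayStringsAreEqualV2 : Prop := ∀ (word1 : List String) (word2 : List String), Dom_arrayStringsAreEqualV2 word1 word2 → Spec_arrayStringsAreEqualV2 word1 word2 (arrayStringsAreEqualV2 word1 word2)

-- ===== LEMMAS AND PROOFS =====

theorem join_nil_eq_flatten (ps : List (List Char)) : PySem.Chars.join [] ps = ps.flatten := by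
  induction ps with
  | nil => simp [PySem.Chars.join_nil]
  | cons h t ih =>
    cases t with
    | nil => simp [PySem.Chars.join, List.intercalate]
    | cons h2 t2 => rw [PySem.Chars.join_cons_cons, ih]; simp

theorem pvCheck_sentinel (l1 l2 : List Char) :
    pvCheck ((l1.map some ++ [none]).zip (l2.map some ++ [none])) = (l1 == l2) := by
  induction l1 generalizing l2 with
  | nil => cases l2 <;> simp [pvCheck]
  | cons h t ih =>
    cases l2 with
    | nil => simp [pvCheck]
    | cons h2 t2 =>
      by_cases hh : h = h2 <;> simp [pvCheck, hh, ih]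

theorem pvGen_eq (word : List String) :
    pvGen word = (word.flatMap String.toList).map some ++ [none] := by
  simp [pvGen, List.map_flatMap]

-- ===== VERDICT (by name: the statement is the Claim_ definition above) =====
theorem arrayStringsAreEqualV2_spec : Claim_equal_arrayStringsAreEqualV2 := by
  intro word1 word2 _
  show arrayStringsAreEqualV2 word1 word2 = arrayStringsAreEqualV2_alt word1 word2
  have h1 : ∀ a b : String, (a == b) = (a.toList == b.toList) := fun a b => by
    simp [← String.toList_inj]
  rw [arrayStringsAreEqualV2, pvGen_eq, pvGen_eq, pvCheck_sentinel,
    arrayStringsAreEqualV2_alt, h1, PySem.Str.toList_join, PySem.Str.toList_join]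
  simp [join_nil_eq_flatten, List.flatMap_def]
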